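-- pv_equiv track=rewrite | github.com/Lagergren-Lab/scuphr | src/data_simulator.py | get_node_ancestors
-- ===== SOURCE A (Python) =====
-- def get_node_ancestors(cell_id, parent_nodes):
--     ancestor_list = [cell_id]
--
--     cur_node = cell_id
--     while cur_node != 0:
--         parent_id = parent_nodes[cur_node]
--         ancestor_list.append(parent_id)
--         cur_node = parent_id
--
--     return ancestor_list
-- ===== SOURCE B (Python) =====
-- def get_node_ancestors(cell_id, parent_nodes):
--     # Recursive walk that CONSUMES the mapping: each step removes the visited
--     # key, so on a cyclic parent map this raises KeyError instead of looping.
--     if cell_id == 0: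
--         return [cell_id]
--     parent_id = parent_nodes[cell_id]
--     remaining = {k: v for k, v in parent_nodes.items() if k != cell_id}
--     return [cell_id] + get_node_ancestors(parent_id, remaining)
-- ===== Notes on version B (the rewrite author's own statement) =====
-- stated objective: alternative
-- what changed: A's imperative while-loop with an append accumulator is replaced by a recursion that prepends the current id and recurses on the parent with the visited key removed from the mapping, so the recursion consumes the mapping and terminates (raising KeyError) on cyclic parent maps where A loops forever.
import Mathlib
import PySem

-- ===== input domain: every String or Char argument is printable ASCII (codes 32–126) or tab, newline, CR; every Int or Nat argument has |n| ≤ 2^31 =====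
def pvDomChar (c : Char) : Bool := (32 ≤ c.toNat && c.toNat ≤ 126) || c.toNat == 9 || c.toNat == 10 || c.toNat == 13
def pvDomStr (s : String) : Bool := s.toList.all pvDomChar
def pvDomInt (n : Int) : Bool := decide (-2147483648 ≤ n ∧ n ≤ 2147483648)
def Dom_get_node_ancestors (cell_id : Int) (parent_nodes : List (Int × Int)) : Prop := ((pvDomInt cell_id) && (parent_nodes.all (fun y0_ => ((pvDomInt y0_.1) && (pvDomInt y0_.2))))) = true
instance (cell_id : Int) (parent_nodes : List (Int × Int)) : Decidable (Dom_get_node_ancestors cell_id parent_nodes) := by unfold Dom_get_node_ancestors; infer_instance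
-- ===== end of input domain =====

-- B replaces A's while-loop (append accumulator, lookups in the fixed dict) by a recursion
-- that prepends the current id and recurses on the parent with the visited key REMOVED from
-- the mapping (objective: alternative; B terminates on cyclic maps where A loops forever).

-- ===== PORT A =====
-- A's while-loop: repeated lookup in the fixed dict, appending to the accumulator.
-- Fuel totalizes it; under Pre_ the walk reaches 0 within parent_nodes.length steps, so
-- length+1 fuel always suffices (the fuel-0 and missing-key fallbacks are only reachable
-- outside Pre_, where the Python loops forever or raises KeyError).
def goA (d : PySem.Dict Int Int) : Nat → Int → List Int → List Int
  | 0, _, acc => acc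
  | fuel+1, cur, acc =>
    if cur = 0 then acc
    else
      match d.get? cur with
      | none => acc
      | some p => goA d fuel p (acc ++ [p])

def get_node_ancestors (cell_id : Int) (parent_nodes : List (Int × Int)) : List Int :=
  goA (PySem.Dict.mk parent_nodes) (parent_nodes.length + 1) cell_id [cell_id]

-- ===== PORT B =====
-- B's recursion consumes the mapping: structural descent on the length of the association
-- list (each successful lookup removes at least one entry), no fuel needed.  The none
-- fallback is Python's KeyError, only reachable outside Pre_.
def goB (d : List (Int × Int)) (cur : Int) : List Int :=
  if cur = 0 then [cur]
  else
    match h : (PySem.Dict.mk d).get? cur with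
    | none => [cur]
    | some p => cur :: goB (d.filter (fun e => !(e.1 == cur))) p
termination_by d.length
decreasing_by
  have hm : (cur, p) ∈ d := PySem.Dict.mem_items_of_get?_eq_some _ h
  simp only [List.length_unattach]
  rw [← List.length_attach (l := d)]
  exact List.length_filter_lt_length_iff_exists.mpr ⟨⟨(cur, p), hm⟩, List.mem_attach _ _, by simp⟩

def get_node_ancestors_alt (cell_id : Int) (parent_nodes : List (Int × Int)) : List Int :=
  goB parent_nodes cell_id

-- ===== PRECONDITION & SPEC =====
-- One parent-pointer step: the node's parent if it has one, else the node itself (a stalled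
-- walk, standing in for A's KeyError — a stalled nonzero walk never reaches 0).
def pvStep (d : List (Int × Int)) (x : Int) : Int := (PySem.Dict.mk d).getD x x

-- Pre_ holds exactly when following parent pointers from cell_id reaches the root 0 —
-- precisely the inputs on which A's while-loop terminates (elsewhere A raises KeyError on a
-- missing key or loops forever on a cycle; a terminating walk visits distinct keys, so
-- parent_nodes.length steps always suffice and the bound excludes nothing).
def Pre_get_node_ancestors (cell_id : Int) (parent_nodes : List (Int × Int)) : Prop :=
  ∃ n ≤ parent_nodes.length, (pvStep parent_nodes)^[n] cell_id = 0
instance (cell_id : Int) (parent_nodes : List (Int × Int)) : Decidable (Pre_get_node_ancestors cell_id parent_nodes) := by unfold Pre_get_node_ancestors; infer_instance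

def pvWitness_get_node_ancestors : Int × (List (Int × Int)) := (3, [(1, 5), (3, 1), (5, 0)])

def Spec_get_node_ancestors (cell_id : Int) (parent_nodes : List (Int × Int)) (out : List Int) : Prop := out = get_node_ancestors_alt cell_id parent_nodes
instance (cell_id : Int) (parent_nodes : List (Int × Int)) (out : List Int) : Decidable (Spec_get_node_ancestors cell_id parent_nodes out) := by unfold Spec_get_node_ancestors; infer_instance

-- ===== CLAIM (what is proved, stated in full; the proofs are below) =====
def Claim_equal_get_node_ancestors : Prop := ∀ (cell_id : Int) (parent_nodes : List (Int × Int)), Dom_get_node_ancestors cell_id parent_nodes → Pre_get_node_ancestors cell_id parent_nodes → Spec_get_node_ancestors cell_id parent_nodes (get_node_ancestors cell_id parent_nodes)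

-- ===== LEMMAS AND PROOFS =====

-- Filtering out the entries of one key leaves every other lookup unchanged …
theorem get?_mk_filter_of_ne (d : List (Int × Int)) (c x : Int) (hx : x ≠ c) :
    (PySem.Dict.mk (d.filter (fun e => !(e.1 == c)))).get? x = (PySem.Dict.mk d).get? x := by
  simp only [PySem.Dict.get?, List.find?_filter]
  have : (fun (a : Int × Int) => decide ((!(a.1 == c)) = true ∧ (a.1 == x) = true))
      = (fun (p : Int × Int) => p.1 == x) := by
    funext a; by_cases h : a.1 = x <;> simp [h, hx]
  rw [this]

-- … and removes that key's own lookup.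
theorem get?_mk_filter_self (d : List (Int × Int)) (c : Int) :
    (PySem.Dict.mk (d.filter (fun e => !(e.1 == c)))).get? c = none := by
  simp only [PySem.Dict.get?, List.find?_filter]
  rw [List.find?_eq_none.mpr] <;> simp

-- pvStep agrees between d and d-with-key-c-removed at any node other than c.
theorem pvStep_filter_of_ne (d : List (Int × Int)) (c x : Int) (hx : x ≠ c) :
    pvStep (d.filter (fun e => !(e.1 == c))) x = pvStep d x := by
  unfold pvStep
  rw [PySem.Dict.getD_eq_get?_getD, PySem.Dict.getD_eq_get?_getD, get?_mk_filter_of_ne d c x hx]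

-- Iterates agree as long as the walk avoids the removed key.
theorem iterate_filter_eq (d : List (Int × Int)) (c p : Int) :
    ∀ m, (∀ i < m, (pvStep d)^[i] p ≠ c) →
      (pvStep (d.filter (fun e => !(e.1 == c))))^[m] p = (pvStep d)^[m] p := by
  intro m
  induction m with
  | zero => intro _; rfl
  | succ k ih =>
    intro h
    rw [Function.iterate_succ_apply', Function.iterate_succ_apply',
      ih (fun i hi => h i (by omega)), pvStep_filter_of_ne d c _ (h k (by omega))]

-- A walk that reaches 0 for the FIRST time at step n never returns to its start node.
theorem walk_no_return (d : List (Int × Int)) (cur : Int) (n : Nat)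
    (h0 : (pvStep d)^[n] cur = 0) (hmin : ∀ i < n, (pvStep d)^[i] cur ≠ 0) :
    ∀ i, 0 < i → i ≤ n → (pvStep d)^[i] cur ≠ cur := by
  intro i hi0 hin heq
  have : (pvStep d)^[n - i] ((pvStep d)^[i] cur) = 0 := by
    rw [← Function.iterate_add_apply]
    rw [(by omega : n - i + i = n)]
    exact h0
  rw [heq] at this
  exact hmin (n - i) (by omega) this

-- B's recursion always puts the current id first.
theorem goB_cons (d : List (Int × Int)) (cur : Int) :
    goB d cur = cur :: (goB d cur).tail := by
  rw [goB.eq_def]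
  split
  · rfl
  · split <;> rfl

-- Main bridge: if the walk in d first reaches 0 at step n, then A's loop (over any dict dF
-- agreeing with d on present keys, with enough fuel) extends acc by the tail of B's result.
theorem goA_eq_goB (n : Nat) : ∀ (d : List (Int × Int)) (dF : PySem.Dict Int Int)
    (cur : Int) (acc : List Int) (fuel : Nat),
    (pvStep d)^[n] cur = 0 →
    (∀ i < n, (pvStep d)^[i] cur ≠ 0) →
    (∀ k, (PySem.Dict.mk d).get? k ≠ none → dF.get? k = (PySem.Dict.mk d).get? k) →
    n < fuel →
    goA dF fuel cur acc = acc ++ (goB d cur).tail := by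
  induction n with
  | zero =>
    intro d dF cur acc fuel h0 _ _ hfuel
    obtain ⟨f, rfl⟩ : ∃ f, fuel = f + 1 := ⟨fuel - 1, by omega⟩
    simp only [Function.iterate_zero_apply] at h0
    rw [goB.eq_def, if_pos h0]
    simp [goA, h0]
  | succ n ih =>
    intro d dF cur acc fuel h0 hmin hinv hfuel
    obtain ⟨f, rfl⟩ : ∃ f, fuel = f + 1 := ⟨fuel - 1, by omega⟩
    have hcur0 : cur ≠ 0 := by simpa using hmin 0 (by omega)
    have hsome : ∃ p, (PySem.Dict.mk d).get? cur = some p := by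
      rcases hh : (PySem.Dict.mk d).get? cur with _ | p
      · exfalso
        have hfix : pvStep d cur = cur := by
          unfold pvStep; rw [PySem.Dict.getD_eq_get?_getD, hh]; rfl
        have := Function.iterate_fixed hfix (n + 1)
        rw [this] at h0; exact hcur0 h0
      · exact ⟨p, rfl⟩
    rcases hsome with ⟨p, hp⟩
    have hstep : pvStep d cur = p := by
      unfold pvStep; rw [PySem.Dict.getD_eq_get?_getD, hp]; rfl
    have hchain : ∀ i, (pvStep d)^[i] p = (pvStep d)^[i + 1] cur := by
      intro i; rw [Function.iterate_succ_apply, hstep]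
    have hnoret : ∀ i ≤ n, (pvStep d)^[i] p ≠ cur := by
      intro i hi
      rw [hchain i]
      exact walk_no_return d cur (n + 1) h0 hmin (i + 1) (by omega) (by omega)
    have hagree : ∀ m ≤ n, (pvStep (d.filter (fun e => !(e.1 == cur))))^[m] p = (pvStep d)^[m] p :=
      fun m hm => iterate_filter_eq d cur p m (fun i hi => hnoret i (by omega))
    -- unfold one step of both programs
    rw [goB.eq_def, if_neg hcur0, hp]
    simp only [goA, if_neg hcur0, hinv cur (by simp [hp]), hp, List.tail_cons]
    rw [ih (d.filter (fun e => !(e.1 == cur))) dF p (acc ++ [p]) f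
      (by rw [hagree n le_rfl, hchain n]; exact h0)
      (by intro i hi; rw [hagree i (by omega), hchain i]; exact hmin (i + 1) (by omega))
      (by
        intro k hk
        have hkc : k ≠ cur := fun h => hk (h ▸ get?_mk_filter_self d cur)
        rw [get?_mk_filter_of_ne d cur k hkc] at hk ⊢
        exact hinv k hk)
      (by omega)]
    rw [goB_cons (d.filter (fun e => !(e.1 == cur))) p]
    simp

-- ===== VERDICT (by name: the statement is the Claim_ definition above) =====
theorem get_node_ancestors_spec : Claim_equal_get_node_ancestors := by
  intro cell_id parent_nodes _ hpre
  unfold Spec_get_node_ancestors get_node_ancestors get_node_ancestors_alt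
  obtain ⟨n, hn, h0⟩ := hpre
  have hex : ∃ m, (pvStep parent_nodes)^[m] cell_id = 0 := ⟨n, h0⟩
  rw [goA_eq_goB (Nat.find hex) parent_nodes (PySem.Dict.mk parent_nodes) cell_id [cell_id]
      (parent_nodes.length + 1) (Nat.find_spec hex) (fun i hi => Nat.find_min hex hi)
      (fun _ _ => rfl) (by have := Nat.find_min' hex h0; omega),
    goB_cons parent_nodes cell_id]
  simp
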